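-- pv_equiv track=rewrite | github.com/ilkka-torma/diddy | experimental/tfg_nontriv.py | fwords
-- ===== SOURCE A (Python) =====
-- def fwords(gens, n):
--     if n == 0:
--         yield ""
--         return
--     for f in fwords(gens, n-1):
--         for g in gens:
--             for G in [g, g.upper()]:
--                 if f == "" or (G.lower() != f[0].lower() or G == f[0]):
--                 #if True:
--                     yield G + f
-- ===== SOURCE B (Python) =====
-- def fwords(gens, n):
--     # Precompute the flat letter alphabet and a dict index mapping each possible
--     # first character to its allowed extensions, then walk the suffix tree with
--     # an explicit stack (iterative DFS), yielding the length-n words lazily.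
--     letters = [G for g in gens for G in (g, g.upper())]
--     firsts = []
--     for L in letters:
--         if L and L[0] not in firsts:
--             firsts.append(L[0])
--     ext = {c: [L for L in letters if L.lower() != c.lower() or L == c] for c in firsts}
--     stack = [("", n)]
--     while stack:
--         w, k = stack.pop()
--         if k <= 0:
--             yield w
--         else:
--             for L in reversed(letters if w == "" else ext[w[0]]):
--                 stack.append((L + w, k - 1))
-- ===== Notes on version B (the rewrite author's own statement) =====
-- stated objective: alternative
-- what changed: Replaces A's recursion on n and its per-word triple nested scan over gens with an explicit-stack iterative DFS over the suffix tree, using a precomputed flat letter alphabet and a dict index mapping each possible first character to its precomputed allowed-extension list, so the per-word guard scan over gens disappears and only O(n*|letters|) stack state is kept.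
import Mathlib
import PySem

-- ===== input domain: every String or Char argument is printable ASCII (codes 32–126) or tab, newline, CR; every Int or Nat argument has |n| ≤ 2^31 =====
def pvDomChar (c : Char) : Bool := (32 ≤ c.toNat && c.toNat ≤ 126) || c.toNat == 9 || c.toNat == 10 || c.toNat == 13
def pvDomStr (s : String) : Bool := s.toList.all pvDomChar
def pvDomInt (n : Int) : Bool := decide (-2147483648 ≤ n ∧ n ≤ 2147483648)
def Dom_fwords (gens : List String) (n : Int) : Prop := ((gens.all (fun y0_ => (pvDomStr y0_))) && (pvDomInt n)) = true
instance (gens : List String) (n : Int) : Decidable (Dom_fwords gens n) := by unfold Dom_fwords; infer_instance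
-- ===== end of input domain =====

-- B replaces A's recursion on n and per-word nested scans over gens with a bottom-up loop over
-- a precomputed flat letter list and a dict index first-char -> allowed extensions; objective: alternative.

-- ===== PORT A =====
-- recursion on n; A only returns for n ≥ 0 (Pre_), so the Nat fuel n.toNat is exact there
def fwordsGo (gens : List String) : Nat → List String
  | 0 => [""]
  | Nat.succ m =>
    (fwordsGo gens m).foldl (fun acc f =>
      gens.foldl (fun acc g =>
        [g, PySem.Str.upper g].foldl (fun acc G =>
          -- f[0] is only read when f ≠ "", so the ' ' default is never used
          if f = "" ∨ PySem.Str.lower G ≠ PySem.Str.lower (String.ofList [(PySem.Str.pyGet? f 0).getD ' ']) ∨ G = String.ofList [(PySem.Str.pyGet? f 0).getD ' ']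
          then acc ++ [G ++ f] else acc) acc) acc) []

def fwords (gens : List String) (n : Int) : List String := fwordsGo gens n.toNat

-- ===== PORT B =====
-- the guard of Source B's dict comprehension, as a Bool on a letter and a first character
def pvOkLetter (L : String) (c : Char) : Bool :=
  PySem.Str.lower L != PySem.Str.lower (String.ofList [c]) || L == String.ofList [c]

-- Source B's while-loop over the explicit stack; the Nat fuel is only a totality guard
-- (it is chosen large enough to never run out: see pvLoop_spec / pvN_le_pow below).
-- Python pushes the options reversed and pops from the end; prepending them in order
-- to a head-popped list is the same traversal.
def fwordsAltLoop (letters : List String) (ext : PySem.Dict Char (List String)) :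
    Nat → List (String × Int) → List String → List String
  | 0, _, acc => acc
  | _ + 1, [], acc => acc
  | fuel + 1, (w, k) :: stack, acc =>
    if k ≤ 0 then fwordsAltLoop letters ext fuel stack (acc ++ [w])
    else fwordsAltLoop letters ext fuel
      (((match w.toList.head? with
         | none => letters
         | some c => ext.getD c []).map (fun L => (L ++ w, k - 1))) ++ stack) acc

def fwords_alt (gens : List String) (n : Int) : List String :=
  let letters := gens.flatMap (fun g => [g, PySem.Str.upper g])
  let firsts := letters.foldl (fun fs L =>
      match L.toList.head? with
      | some c => if c ∈ fs then fs else fs ++ [c]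
      | none => fs) []
  let ext : PySem.Dict Char (List String) :=
    firsts.foldl (fun d c => d.insert c (letters.filter (fun L => pvOkLetter L c))) PySem.Dict.empty
  fwordsAltLoop letters ext ((letters.length + 1) ^ (n.toNat + 1)) [("", n)] []

-- ===== PRECONDITION & SPEC =====
-- Pre_ excludes n < 0, on which Python A recurses past its base case and raises RecursionError
def Pre_fwords (gens : List String) (n : Int) : Prop := 0 ≤ n
instance (gens : List String) (n : Int) : Decidable (Pre_fwords gens n) := by unfold Pre_fwords; infer_instance
def pvWitness_fwords : List String × Int := (["ab", "c"], 2)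

def Spec_fwords (gens : List String) (n : Int) (out : List String) : Prop := out = fwords_alt gens n
instance (gens : List String) (n : Int) (out : List String) : Decidable (Spec_fwords gens n out) := by unfold Spec_fwords; infer_instance

-- ===== CLAIM =====
def Claim_equal_fwords : Prop := ∀ (gens : List String) (n : Int), Dom_fwords gens n → Pre_fwords gens n → Spec_fwords gens n (fwords gens n)
-- ===== LEMMAS AND PROOFS =====
-- proof-only abbreviations for the let-bound values of fwords_alt (definitionally equal)
def pvLetters (gens : List String) : List String := gens.flatMap (fun g => [g, PySem.Str.upper g])
def pvFirsts (gens : List String) : List Char :=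
  (pvLetters gens).foldl (fun fs L =>
      match L.toList.head? with
      | some c => if c ∈ fs then fs else fs ++ [c]
      | none => fs) []
def pvExt (gens : List String) : PySem.Dict Char (List String) :=
  (pvFirsts gens).foldl (fun d c => d.insert c ((pvLetters gens).filter (fun L => pvOkLetter L c))) PySem.Dict.empty
def pvOpts (gens : List String) (w : String) : List String :=
  match w.toList.head? with
  | none => pvLetters gens
  | some c => (pvExt gens).getD c []
def pvStepB (gens : List String) (words : List String) : List String :=
  words.flatMap (fun w => (pvOpts gens w).map (fun L => L ++ w))

theorem pvOpts_none (gens : List String) (w : String) (h : w.toList.head? = none) :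
    pvOpts gens w = pvLetters gens := by unfold pvOpts; rw [h]

theorem pvOpts_some (gens : List String) (w : String) (c : Char) (h : w.toList.head? = some c) :
    pvOpts gens w = (pvExt gens).getD c [] := by unfold pvOpts; rw [h]

theorem pvGetD_foldl_insert_not_mem {v : Char → List String} (fs : List Char) (d : PySem.Dict Char (List String)) (c : Char) (h : c ∉ fs) :
    (fs.foldl (fun d c => d.insert c (v c)) d).getD c [] = d.getD c [] := by
  induction fs generalizing d with
  | nil => rfl
  | cons a rest ih =>
    simp only [List.foldl_cons]
    rw [ih _ (fun hm => h (List.mem_cons_of_mem _ hm)), PySem.Dict.getD_insert]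
    simp only [List.mem_cons] at h
    rw [if_neg (fun he => h (Or.inl he))]

theorem pvGetD_foldl_insert_mem {v : Char → List String} (fs : List Char) (d : PySem.Dict Char (List String)) (c : Char) (h : c ∈ fs) :
    (fs.foldl (fun d c => d.insert c (v c)) d).getD c [] = v c := by
  induction fs generalizing d with
  | nil => cases h
  | cons a rest ih =>
    simp only [List.foldl_cons]
    by_cases hr : c ∈ rest
    · exact ih _ hr
    · have hc : c = a := by
        rcases List.mem_cons.mp h with h | h
        · exact h
        · exact absurd h hr
      subst hc
      rw [pvGetD_foldl_insert_not_mem _ _ _ hr, PySem.Dict.getD_insert, if_pos rfl]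

theorem pvExt_getD (gens : List String) (c : Char) (h : c ∈ pvFirsts gens) :
    (pvExt gens).getD c [] = (pvLetters gens).filter (fun L => pvOkLetter L c) :=
  pvGetD_foldl_insert_mem _ _ _ h

-- characterisation of the firsts-collecting fold
theorem pvMem_foldl_firsts (L : List String) (fs : List Char) (c : Char)
    (h : c ∈ fs ∨ ∃ s ∈ L, s.toList.head? = some c) :
    c ∈ L.foldl (fun fs L =>
      match L.toList.head? with
      | some c => if c ∈ fs then fs else fs ++ [c]
      | none => fs) fs := by
  induction L generalizing fs with
  | nil =>
    rcases h with h | ⟨s, hs, _⟩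
    · exact h
    · cases hs
  | cons a rest ih =>
    simp only [List.foldl_cons]
    apply ih
    rcases h with h | ⟨s, hs, hhd⟩
    · left
      cases ha : a.toList.head? with
      | none => exact h
      | some d =>
        by_cases hd : d ∈ fs
        · simp [hd, h]
        · simp [hd, h]
    · rcases List.mem_cons.mp hs with rfl | hs'
      · rw [hhd]
        left
        by_cases hc : c ∈ fs
        · simp [hc]
        · simp [hc]
      · right; exact ⟨s, hs', hhd⟩

theorem pvMem_firsts (gens : List String) (c : Char) (h : ∃ s ∈ pvLetters gens, s.toList.head? = some c) :
    c ∈ pvFirsts gens := pvMem_foldl_firsts _ _ _ (Or.inr h)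

-- invariant: each word is "" or starts with the first char of some letter
def pvGood (gens : List String) (w : String) : Prop :=
  w.toList.head? = none ∨ ∃ s ∈ pvLetters gens, s.toList.head? = w.toList.head?

theorem pvOpts_subset (gens : List String) (f : String) (hf : pvGood gens f) :
    ∀ L ∈ pvOpts gens f, L ∈ pvLetters gens := by
  intro L hL
  cases hc : f.toList.head? with
  | none => rw [pvOpts_none gens f hc] at hL; exact hL
  | some c =>
    rw [pvOpts_some gens f c hc] at hL
    have hcf : c ∈ pvFirsts gens := by
      rcases hf with hg | hg
      · rw [hc] at hg; cases hg
      · rw [hc] at hg; exact pvMem_firsts gens c hg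
    rw [pvExt_getD gens c hcf] at hL
    exact (List.mem_filter.mp hL).1

-- A's one-level emission for one word f (general accumulator) equals B's indexed lookup, for good f
theorem pvEmit_eq (gens : List String) (f : String) (hf : pvGood gens f) (acc : List String) :
    gens.foldl (fun acc g =>
        [g, PySem.Str.upper g].foldl (fun acc G =>
          if f = "" ∨ PySem.Str.lower G ≠ PySem.Str.lower (String.ofList [(PySem.Str.pyGet? f 0).getD ' ']) ∨ G = String.ofList [(PySem.Str.pyGet? f 0).getD ' ']
          then acc ++ [G ++ f] else acc) acc) acc
      = acc ++ (pvOpts gens f).map (fun L => L ++ f) := by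
  have hstep : (fun (acc : List String) g =>
        [g, PySem.Str.upper g].foldl (fun acc G =>
          if f = "" ∨ PySem.Str.lower G ≠ PySem.Str.lower (String.ofList [(PySem.Str.pyGet? f 0).getD ' ']) ∨ G = String.ofList [(PySem.Str.pyGet? f 0).getD ' ']
          then acc ++ [G ++ f] else acc) acc)
      = fun acc g => acc ++ (([g, PySem.Str.upper g].filter (fun G =>
          decide (f = "" ∨ PySem.Str.lower G ≠ PySem.Str.lower (String.ofList [(PySem.Str.pyGet? f 0).getD ' ']) ∨ G = String.ofList [(PySem.Str.pyGet? f 0).getD ' ']))).map (fun G => G ++ f)) := by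
    funext acc g
    exact PySem.List.foldl_append_ite
      (fun G => f = "" ∨ PySem.Str.lower G ≠ PySem.Str.lower (String.ofList [(PySem.Str.pyGet? f 0).getD ' ']) ∨ G = String.ofList [(PySem.Str.pyGet? f 0).getD ' '])
      (fun G => G ++ f) [g, PySem.Str.upper g] acc
  rw [hstep, PySem.List.foldl_append_eq_flatMap]
  congr 1
  have hflat : ∀ (q : String → Bool),
      gens.flatMap (fun g => (([g, PySem.Str.upper g].filter q).map (fun G => G ++ f)))
      = (((pvLetters gens).filter q).map (fun G => G ++ f)) := by
    intro q
    unfold pvLetters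
    rw [List.filter_flatMap, List.map_flatMap]
  rw [hflat]
  cases hcase : f.toList.head? with
  | none =>
    rw [pvOpts_none gens f hcase]
    have hfe : f = "" := by
      apply String.toList_eq_nil_iff.mp
      cases hl : f.toList with
      | nil => rfl
      | cons a t => rw [hl] at hcase; cases hcase
    subst hfe
    simp
  | some c =>
    have hne : f ≠ "" := by
      intro he; subst he; cases hcase
    have hget : (PySem.Str.pyGet? f 0).getD ' ' = c := by
      have h0 : PySem.Str.pyGet? f ((0 : Nat) : Int) = f.toList[(0 : Nat)]? := PySem.Str.pyGet?_natCast f 0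
      have hh : f.toList[(0 : Nat)]? = some c := by
        rw [← List.head?_eq_getElem?]; exact hcase
      simp only [Nat.cast_zero] at h0
      rw [h0, hh]
      rfl
    rcases hf with hg | hg
    · rw [hcase] at hg; cases hg
    · rw [hcase] at hg
      have hc : c ∈ pvFirsts gens := pvMem_firsts gens c hg
      rw [pvOpts_some gens f c hcase, pvExt_getD gens c hc]
      simp only [hget]
      congr 1
      apply List.filter_congr
      intro G _
      simp only [pvOkLetter, hne, bne]
      by_cases h1 : PySem.Str.lower G = PySem.Str.lower (String.ofList [c]) <;>
        by_cases h2 : G = String.ofList [c] <;> simp [h1, h2]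

-- words produced by B's step are good
theorem pvGood_step (gens : List String) (words : List String)
    (h : ∀ w ∈ words, pvGood gens w) :
    ∀ w ∈ pvStepB gens words, pvGood gens w := by
  intro w hw
  simp only [pvStepB, List.mem_flatMap] at hw
  obtain ⟨f, hf, hw⟩ := hw
  simp only [List.mem_map] at hw
  obtain ⟨L, hL, rfl⟩ := hw
  have hLlet : L ∈ pvLetters gens := pvOpts_subset gens f (h f hf) L hL
  have happ : (L ++ f).toList = L.toList ++ f.toList := by simp
  cases hLh : L.toList.head? with
  | some d =>
    right
    refine ⟨L, hLlet, ?_⟩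
    rw [hLh, happ, List.head?_append, hLh]
    rfl
  | none =>
    have hLe : L.toList = [] := by
      cases hl : L.toList with
      | nil => rfl
      | cons a t => rw [hl] at hLh; cases hLh
    have : (L ++ f).toList = f.toList := by rw [happ, hLe]; simp
    unfold pvGood
    rw [this]
    exact h f hf

-- A's step over a whole word list equals B's step, for good words
theorem pvStep_eq (gens : List String) (words : List String)
    (h : ∀ w ∈ words, pvGood gens w) :
    words.foldl (fun acc f =>
      gens.foldl (fun acc g =>
        [g, PySem.Str.upper g].foldl (fun acc G =>
          if f = "" ∨ PySem.Str.lower G ≠ PySem.Str.lower (String.ofList [(PySem.Str.pyGet? f 0).getD ' ']) ∨ G = String.ofList [(PySem.Str.pyGet? f 0).getD ' ']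
          then acc ++ [G ++ f] else acc) acc) acc) []
      = pvStepB gens words := by
  have hgen : ∀ (acc : List String),
      words.foldl (fun acc f =>
        gens.foldl (fun acc g =>
          [g, PySem.Str.upper g].foldl (fun acc G =>
            if f = "" ∨ PySem.Str.lower G ≠ PySem.Str.lower (String.ofList [(PySem.Str.pyGet? f 0).getD ' ']) ∨ G = String.ofList [(PySem.Str.pyGet? f 0).getD ' ']
            then acc ++ [G ++ f] else acc) acc) acc) acc
      = acc ++ pvStepB gens words := by
    induction words with
    | nil => intro acc; simp [pvStepB]
    | cons f rest ih =>
      intro acc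
      rw [List.foldl_cons, pvEmit_eq gens f (h f (List.mem_cons_self ..)) acc,
          ih (fun w hw => h w (List.mem_cons_of_mem _ hw))]
      simp [pvStepB, List.append_assoc]
  have := hgen []
  simpa using this

theorem fwordsGo_eq (gens : List String) (m : Nat) :
    fwordsGo gens m = (pvStepB gens)^[m] [""]
    ∧ ∀ w ∈ fwordsGo gens m, pvGood gens w := by
  induction m with
  | zero =>
    constructor
    · simp [fwordsGo]
    · intro w hw
      simp [fwordsGo] at hw
      subst hw
      exact Or.inl rfl
  | succ m ih =>
    obtain ⟨ihval, ihgood⟩ := ih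
    have hstep : fwordsGo gens (m + 1) = pvStepB gens (fwordsGo gens m) := by
      show (fwordsGo gens m).foldl _ [] = _
      exact pvStep_eq gens (fwordsGo gens m) ihgood
    constructor
    · rw [hstep, ihval, ← Function.iterate_succ_apply' (pvStepB gens) m [""]]
    · rw [hstep]
      exact pvGood_step gens _ ihgood

-- the per-node subtree yields of B's DFS, recursively
def pvExpand (gens : List String) : Nat → String → List String
  | 0, w => [w]
  | k + 1, w => (pvOpts gens w).flatMap (fun L => pvExpand gens k (L ++ w))

-- an upper bound on the number of nodes of a depth-k subtree
def pvN (gens : List String) : Nat → Nat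
  | 0 => 1
  | k + 1 => 1 + (pvLetters gens).length * pvN gens k

theorem pvN_le_pow (gens : List String) (k : Nat) :
    pvN gens k ≤ ((pvLetters gens).length + 1) ^ (k + 1) := by
  induction k with
  | zero => simp [pvN]
  | succ k ih =>
    have h1 : 1 ≤ ((pvLetters gens).length + 1) ^ (k + 1) :=
      Nat.one_le_pow _ _ (by omega)
    calc pvN gens (k + 1) = 1 + (pvLetters gens).length * pvN gens k := rfl
      _ ≤ 1 + (pvLetters gens).length * (((pvLetters gens).length + 1) ^ (k + 1)) :=
          by exact Nat.add_le_add_left (Nat.mul_le_mul_left _ ih) 1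
      _ ≤ ((pvLetters gens).length + 1) ^ (k + 1) + (pvLetters gens).length * (((pvLetters gens).length + 1) ^ (k + 1)) :=
          Nat.add_le_add_right h1 _
      _ = ((pvLetters gens).length + 1) ^ (k + 2) := by ring

theorem pvOpts_length (gens : List String) (w : String) :
    (pvOpts gens w).length ≤ (pvLetters gens).length := by
  cases hc : w.toList.head? with
  | none => rw [pvOpts_none gens w hc]
  | some c =>
    rw [pvOpts_some gens w c hc]
    by_cases hm : c ∈ pvFirsts gens
    · rw [pvExt_getD gens c hm]
      exact List.length_filter_le _ _
    · unfold pvExt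
      rw [pvGetD_foldl_insert_not_mem _ _ _ hm, PySem.Dict.getD_empty]
      simp

-- exchanging one DFS level against one bottom-up level
theorem pvExpand_exchange (gens : List String) (m : Nat) (ws : List String) :
    (pvStepB gens ws).flatMap (pvExpand gens m) = ws.flatMap (pvExpand gens (m + 1)) := by
  unfold pvStepB
  rw [List.flatMap_assoc]
  apply List.flatMap_congr
  intro w _
  rw [List.flatMap_def, List.map_map]
  show ((pvOpts gens w).map fun L => pvExpand gens m (L ++ w)).flatten = _
  rw [← List.flatMap_def]
  rfl

theorem pvExpand_iterate (gens : List String) (m : Nat) :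
    ∀ ws : List String, ws.flatMap (pvExpand gens m) = (pvStepB gens)^[m] ws := by
  induction m with
  | zero => intro ws; simp [pvExpand]
  | succ m ih =>
    intro ws
    rw [← pvExpand_exchange gens m ws, ih (pvStepB gens ws),
        Function.iterate_succ_apply (pvStepB gens) m ws]

-- the fuelled stack loop computes the concatenated subtree yields, given enough fuel
theorem pvLoop_spec (gens : List String) (fuel : Nat) :
    ∀ (st : List (String × Int)) (acc : List String),
      (st.map (fun p => pvN gens p.2.toNat)).sum ≤ fuel →
      fwordsAltLoop (pvLetters gens) (pvExt gens) fuel st acc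
        = acc ++ st.flatMap (fun p => pvExpand gens p.2.toNat p.1) := by
  induction fuel with
  | zero =>
    intro st acc h
    cases st with
    | nil => simp [fwordsAltLoop]
    | cons p rest =>
      exfalso
      have h1 : 1 ≤ pvN gens p.2.toNat := by
        cases hk : p.2.toNat with
        | zero => simp [pvN]
        | succ k => simp [pvN]
      simp only [List.map_cons, List.sum_cons] at h
      omega
  | succ fuel ih =>
    intro st acc h
    cases st with
    | nil => simp [fwordsAltLoop]
    | cons p rest =>
      obtain ⟨w, k⟩ := p
      simp only [List.map_cons, List.sum_cons] at h
      show fwordsAltLoop (pvLetters gens) (pvExt gens) (fuel + 1) ((w, k) :: rest) acc = _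
      rw [fwordsAltLoop]
      by_cases hk : k ≤ 0
      · rw [if_pos hk]
        have hk0 : k.toNat = 0 := by omega
        rw [ih rest (acc ++ [w]) (by rw [hk0] at h; simp [pvN] at h; omega)]
        simp [hk0, pvExpand]
      · rw [if_neg hk]
        have hmatch : (match w.toList.head? with
            | none => pvLetters gens
            | some c => (pvExt gens).getD c []) = pvOpts gens w := rfl
        rw [hmatch]
        have hm : ∃ m : Nat, k.toNat = m + 1 ∧ (k - 1).toNat = m := by
          refine ⟨(k - 1).toNat, by omega, rfl⟩
        obtain ⟨m, hm1, hm2⟩ := hm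
        have hb : (pvOpts gens w).length * pvN gens m ≤ (pvLetters gens).length * pvN gens m :=
          Nat.mul_le_mul_right _ (pvOpts_length gens w)
        have hN : pvN gens k.toNat = 1 + (pvLetters gens).length * pvN gens m := by
          rw [hm1]; rfl
        have hsum : ((((pvOpts gens w).map (fun L => (L ++ w, k - 1))) ++ rest).map
            (fun p => pvN gens p.2.toNat)).sum ≤ fuel := by
          rw [List.map_append, List.sum_append, List.map_map]
          have hone : (((pvOpts gens w).map ((fun p => pvN gens p.2.toNat) ∘ (fun L => (L ++ w, k - 1))))).sum
              = (pvOpts gens w).length * pvN gens m := by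
            have : ((fun p : String × Int => pvN gens p.2.toNat) ∘ (fun L : String => (L ++ w, k - 1)))
                = fun _ => pvN gens m := by
              funext L; simp [hm2]
            rw [this, List.map_const', List.sum_replicate, smul_eq_mul]
          rw [hone]
          omega
        rw [ih _ acc hsum]
        congr 1
        rw [List.flatMap_append, List.flatMap_map]
        congr 1
        show (pvOpts gens w).flatMap (fun L => pvExpand gens (k - 1).toNat (L ++ w))
            = pvExpand gens k.toNat w
        rw [hm1, hm2]
        rfl

-- ===== VERDICT =====
theorem fwords_spec : Claim_equal_fwords := by
  intro gens n _ hpre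
  unfold Spec_fwords fwords
  show fwordsGo gens n.toNat
      = fwordsAltLoop (pvLetters gens) (pvExt gens)
          (((pvLetters gens).length + 1) ^ (n.toNat + 1)) [("", n)] []
  rw [pvLoop_spec gens _ [("", n)] [] (by simpa using pvN_le_pow gens n.toNat)]
  rw [(fwordsGo_eq gens n.toNat).1, ← pvExpand_iterate gens n.toNat [""]]
  simp
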